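-- pv_equiv track=rewrite | github.com/ehhop/epic-report-parser | ehhop.py | return_problems_per_month
-- ===== SOURCE A (Python) =====
-- def return_problems_per_month(lst):
-- 	if len(lst) == 0:
-- 		return {}
-- 	newlst = [x.lower() for x in lst]
-- 	uniquelist = list(set(newlst))
-- 	top_dict = dict.fromkeys(uniquelist,0)
-- 	for x in uniquelist:
-- 		counts = newlst.count(x)
-- 		top_dict[x] = counts
-- 	return top_dict
-- ===== SOURCE B (Python) =====
-- def return_problems_per_month(lst):
--     top = {}
--     for x in lst:
--         k = x.lower()
--         top[k] = top.get(k, 0) + 1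
--     return top
-- ===== Notes on version B (the rewrite author's own statement) =====
-- stated objective: faster
-- what changed: Replaces A's set-of-uniques plus a full newlst.count scan per unique key (and the intermediate lowered list / fromkeys dict) with a single pass that increments a dict counter per element.
import Mathlib
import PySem

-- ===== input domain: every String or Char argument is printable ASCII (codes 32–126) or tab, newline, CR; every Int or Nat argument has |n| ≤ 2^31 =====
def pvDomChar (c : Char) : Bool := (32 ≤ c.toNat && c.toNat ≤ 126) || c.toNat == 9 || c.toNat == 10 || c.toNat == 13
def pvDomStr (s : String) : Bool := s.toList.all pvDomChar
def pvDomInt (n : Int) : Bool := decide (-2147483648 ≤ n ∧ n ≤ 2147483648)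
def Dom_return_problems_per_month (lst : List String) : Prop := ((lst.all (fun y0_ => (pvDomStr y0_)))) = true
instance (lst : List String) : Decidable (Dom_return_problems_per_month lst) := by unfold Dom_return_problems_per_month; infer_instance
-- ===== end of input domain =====

-- B replaces A's per-unique-key full count scan by a single counting pass (objective: faster).
-- Python dict equality ignores order; both ports list items in first-occurrence order of the lowered list.

-- ===== PORT A =====
def return_problems_per_month (lst : List String) : List (String × Int) :=
  if lst.length = 0 then [] else
  let newlst := lst.map PySem.Str.lower
  let uniquelist : PySem.Set String := PySem.Set.ofList newlst
  let top_dict := uniquelist.foldl (fun d x => d.insert x (0 : Int)) PySem.Dict.empty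
  let top_dict := uniquelist.foldl
    (fun d x => d.insert x ((PySem.List.count newlst x : Int))) top_dict
  top_dict.items

-- ===== PORT B =====
def return_problems_per_month_alt (lst : List String) : List (String × Int) :=
  (lst.foldl (fun top x =>
      let k := PySem.Str.lower x
      top.insert k (top.getD k 0 + 1))
    (PySem.Dict.empty : PySem.Dict String Int)).items

-- ===== PRECONDITION & SPEC =====
def Spec_return_problems_per_month (lst : List String) (out : List (String × Int)) : Prop := out = return_problems_per_month_alt lst
instance (lst : List String) (out : List (String × Int)) : Decidable (Spec_return_problems_per_month lst out) := by unfold Spec_return_problems_per_month; infer_instance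

-- ===== CLAIM (what is proved, stated in full; the proofs are below) =====
def Claim_equal_return_problems_per_month : Prop := ∀ (lst : List String), Dom_return_problems_per_month lst → Spec_return_problems_per_month lst (return_problems_per_month lst)

-- ===== LEMMAS AND PROOFS =====

-- Overwriting fold: reinserting each key of a nodup suffix keeps positions and replaces values.
theorem pv_foldl_insert_overwrite {κ ν : Type} [BEq κ] [LawfulBEq κ]
    (f g : κ → ν) :
    ∀ (u : List κ) (pre : List (κ × ν)) (d : PySem.Dict κ ν),
      u.Nodup → (∀ x ∈ u, x ∉ pre.map Prod.fst) →
      d.items = pre ++ u.map (fun x => (x, g x)) →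
      (u.foldl (fun d x => d.insert x (f x)) d).items
        = pre ++ u.map (fun x => (x, f x)) := by
  intro u
  induction u with
  | nil => intro pre d _ _ hit; simpa using hit
  | cons x us ih =>
    intro pre d hnd hfresh hit
    have hxpre : x ∉ pre.map Prod.fst := hfresh x (by simp)
    have hxus : x ∉ us := by simp at hnd; exact hnd.1
    have hcont : d.contains x = true := by
      rw [PySem.Dict.contains_iff_mem_keys]
      simp only [PySem.Dict.keys, hit]
      simp
    have hitems : (d.insert x (f x)).items
        = (pre ++ [(x, f x)]) ++ us.map (fun y => (y, g y)) := by
      rw [PySem.Dict.items_insert_of_contains _ _ hcont, hit]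
      simp only [List.map_append, List.map_cons, List.map_map]
      have hpre : pre.map (fun p => if p.1 == x then (x, f x) else p) = pre := by
        conv_rhs => rw [← List.map_id pre]
        apply List.map_congr_left
        intro p hp
        have : p.1 ≠ x := fun h => hxpre (by simp [← h]; exact ⟨p.2, hp⟩)
        simp [this]
      have hus : us.map ((fun p => if p.1 == x then (x, f x) else p) ∘ fun y => (y, g y))
          = us.map (fun y => (y, g y)) := by
        apply List.map_congr_left
        intro y hy
        have : y ≠ x := fun h => hxus (h ▸ hy)
        simp [Function.comp, this]
      simp [hpre, hus]
    have := ih (pre ++ [(x, f x)]) (d.insert x (f x))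
      (by simp at hnd; exact hnd.2)
      (by intro y hy
          simp only [List.map_append, List.mem_append]
          push Not
          refine ⟨fun h => hfresh y (by simp [hy]) h, ?_⟩
          simp at hnd
          intro h; simp at h; exact hnd.1 (h ▸ hy))
      hitems
    simpa using this

-- A's items are the unique lowered strings paired with their counts.
theorem pv_A_items (lst : List String) (h : lst ≠ []) :
    return_problems_per_month lst
      = (PySem.Set.ofList (lst.map PySem.Str.lower)).map
          (fun x => (x, ((lst.map PySem.Str.lower).count x : Int))) := by
  unfold return_problems_per_month
  have hlen : ¬ lst.length = 0 := by simpa using h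
  simp only [hlen, if_false]
  set newlst := lst.map PySem.Str.lower with hnew
  set u : PySem.Set String := PySem.Set.ofList newlst with hu
  have hnd : u.Nodup := PySem.Set.nodup_ofList newlst
  have h0 : (u.foldl (fun d x => d.insert x (0 : Int)) PySem.Dict.empty).items
      = ([] : List (String × Int)) ++ u.map (fun x => (x, (0 : Int))) := by
    have := PySem.Dict.items_foldl_insert_fresh
      (d := (PySem.Dict.empty : PySem.Dict String Int))
      (l := u) (k := fun x => x) (v := fun _ => (0 : Int))
      (by intro a _; simp) (by simpa using hnd)
    simpa using this
  have h1 := pv_foldl_insert_overwrite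
    (f := fun x => ((PySem.List.count newlst x : Int)))
    (g := fun _ => (0 : Int)) u []
    (u.foldl (fun d x => d.insert x (0 : Int)) PySem.Dict.empty)
    hnd (by simp) h0
  simpa [PySem.List.count_eq] using h1

-- B is collections.Counter of the lowered list.
theorem pv_B_items (lst : List String) :
    return_problems_per_month_alt lst
      = (PySem.Set.ofList (lst.map PySem.Str.lower)).map
          (fun x => (x, ((lst.map PySem.Str.lower).count x : Int))) := by
  unfold return_problems_per_month_alt
  have hfold : (lst.foldl (fun top x =>
        top.insert (PySem.Str.lower x) (top.getD (PySem.Str.lower x) 0 + 1))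
        (PySem.Dict.empty : PySem.Dict String Int))
      = (lst.map PySem.Str.lower).foldl
        (fun top k => top.insert k (top.getD k 0 + 1)) PySem.Dict.empty := by
    rw [List.foldl_map]
  have hmod : ((lst.map PySem.Str.lower).foldl
        (fun top k => top.insert k (top.getD k 0 + 1)) PySem.Dict.empty)
      = PySem.Dict.counter (lst.map PySem.Str.lower) := by
    rw [PySem.Dict.counter_eq_foldl]
    rfl
  rw [hfold, hmod, PySem.Dict.items_counter]

-- ===== VERDICT (by name: the statement is the Claim_ definition above) =====
theorem return_problems_per_month_spec : Claim_equal_return_problems_per_month := by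
  intro lst _
  unfold Spec_return_problems_per_month
  rcases eq_or_ne lst [] with rfl | h
  · rfl
  · rw [pv_A_items lst h, pv_B_items lst]
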